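-- pv_equiv track=rewrite | github.com/jayfuuuu/Codility | practice/lesson_4/FrogRiverOne_solution.py | solution
-- ===== SOURCE A (Python) =====
-- def solution(end, process):
--     check = set()
--     target = sum(range(end+1))
--     tail = len(process)-1
--     for idx, res in enumerate(process):
--         if (res not in check):
--             if (res <= end):
--                 check.add(res)
--                 target -= res
--         if target == 0 : return idx
--         elif idx == tail : return  int(-1)
-- ===== SOURCE B (Python) =====
-- def solution(end, process):
--     # Earliest index of each leaf position, in one pass.
--     first = {}
--     for i, v in enumerate(process):
--         if v not in first:
--             first[v] = i
--     # The river is crossable once every position 1..end has fallen: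
--     # the answer is the latest of their first-occurrence times.
--     latest = 0
--     for p in range(1, end + 1):
--         if p not in first:
--             return -1
--         latest = max(latest, first[p])
--     return latest
-- ===== Notes on version B (the rewrite author's own statement) =====
-- stated objective: alternative
-- what changed: Replaces A's running set-plus-remaining-sum single pass (target = sum(range(end+1)) decremented as new leaves arrive, checked at every step) by a two-phase decomposition: one pass building a dict of each leaf's first-occurrence index, then a pass over positions 1..end taking the max first index (or -1 if a position is missing); Pre_ excludes only the empty process list, on which A falls off its loop and returns None, which is not an int.
-- intended difference: On inputs whose leaves cover 1..end but where some leaf that is negative (and <= end) falls no later than the covering moment, A returns -1 because the negative value corrupts its remaining-sum target, while B returns the actual covering time, which is the intended answer since such leaves are irrelevant to covering positions 1..end. — e.g. on solution(1, [-1, 1]): A returns -1, B returns 1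
-- outside the precondition, e.g. on solution(1, []): A returns None, B returns -1
import Mathlib
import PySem

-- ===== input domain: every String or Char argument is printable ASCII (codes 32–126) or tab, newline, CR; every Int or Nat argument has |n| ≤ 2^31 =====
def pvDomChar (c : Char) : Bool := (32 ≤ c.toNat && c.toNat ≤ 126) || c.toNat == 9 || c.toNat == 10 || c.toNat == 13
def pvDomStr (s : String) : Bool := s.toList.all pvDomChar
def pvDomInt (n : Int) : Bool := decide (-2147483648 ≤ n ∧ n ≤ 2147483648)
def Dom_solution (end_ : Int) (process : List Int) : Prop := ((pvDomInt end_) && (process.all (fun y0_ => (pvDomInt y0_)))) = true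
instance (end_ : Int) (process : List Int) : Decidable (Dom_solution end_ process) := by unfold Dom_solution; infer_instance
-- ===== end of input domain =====

-- B replaces A's running set + remaining-sum single pass by two phases (first-occurrence dict,
-- then max first-index over positions 1..end); equivalence is about the return value on
-- nonempty `process` (on [] the Python A returns None, which is not an int), outside D_.


-- ===== PORT A =====
-- sum(range(b)): exact value of Python's builtin sum over the lazy range object, for every Int b
-- (closed form of the builtin; the empty range sums to 0)
def pySum0 (b : Int) : Int := if 0 < b then b * (b - 1) / 2 else 0

-- the for-loop over enumerate(process), with early returns; state = (check, target)
def solutionLoop (end_ tail : Int) (check : PySem.Set Int) (target : Int) : List (Int × Int) → Int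
  | [] => -1   -- unreachable for nonempty process (Python A returns None there; excluded by Pre_)
  | (idx, res) :: rest =>
    let st :=
      if !(PySem.Set.contains check res) then
        (if res ≤ end_ then (PySem.Set.add check res, target - res) else (check, target))
      else (check, target)
    if st.2 = 0 then idx
    else if idx = tail then -1
    else solutionLoop end_ tail st.1 st.2 rest

def solution (end_ : Int) (process : List Int) : Int :=
  solutionLoop end_ ((process.length : Int) - 1) PySem.Set.empty
    (pySum0 (end_ + 1)) (PySem.List.enumerate process 0)

-- ===== PORT B =====
-- phase 2: 'for p in range(1, end+1): …' with the running max latest; range is consumed lazily,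
-- so the loop is a recursion on the current position p with an early -1 exit
-- the first argument counts the iterations left in range(1, end+1), i.e. (end+1-p); the loop
-- exits early with -1 at the first missing position
def crossLoop (first : PySem.Dict Int Int) : Nat → Int → Int → Int
  | 0, _, latest => latest
  | n + 1, p, latest =>
    if !(first.contains p) then -1
    else crossLoop first n (p + 1) (max latest (first.getD p 0))

def solution_alt (end_ : Int) (process : List Int) : Int :=
  let first := (PySem.List.enumerate process 0).foldl
      (fun d p => if d.contains p.2 then d else d.insert p.2 p.1) PySem.Dict.empty
  crossLoop first end_.toNat 1 0

-- ===== PRECONDITION & SPEC =====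
-- Pre_ excludes only the empty process, on which A falls off its loop and returns None (not an int).
def Pre_solution (end_ : Int) (process : List Int) : Prop := process ≠ []
instance (end_ : Int) (process : List Int) : Decidable (Pre_solution end_ process) := by unfold Pre_solution; infer_instance
def pvWitness_solution : Int × List Int := (2, [1, 2])

-- On inputs whose leaves cover 1..end_ but where a negative leaf ≤ end_ falls no later than the
-- covering moment, A returns -1 (the negative value corrupts its remaining-sum target) while B
-- returns the actual covering time, which is the intended answer since such leaves are irrelevant.
-- (`wins end_ l`: l is nonempty and its leaves cover every position 1..end_, counted via the
-- distinct in-range values; D_: the whole process covers, but the prefix before the first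
-- negative leaf ≤ end_ does not.)
def wins (end_ : Int) (l : List Int) : Prop :=
  l ≠ .nil ∧ end_.toNat ≤ l.dedup.countP fun v => 1 ≤ v && v ≤ end_

def D_solution (end_ : Int) (process : List Int) : Prop :=
  wins end_ process ∧ ¬ wins end_ (process.takeWhile fun v => 0 ≤ v || end_ < v)
instance (end_ : Int) (process : List Int) : Decidable (D_solution end_ process) := by unfold D_solution wins; infer_instance

def Spec_solution (end_ : Int) (process : List Int) (out : Int) : Prop := ¬ D_solution end_ process → out = solution_alt end_ process
instance (end_ : Int) (process : List Int) (out : Int) : Decidable (Spec_solution end_ process out) := by unfold Spec_solution; infer_instance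

def pvDiffWitness_solution : Int × List Int := (1, [-1, 1])
def pvDiffWitnessOut_solution : Int × Int := (-1, 1)

-- ===== CLAIM (what is proved, stated in full; the proofs are below) =====
def Claim_unchanged_solution : Prop := ∀ (end_ : Int) (process : List Int), Dom_solution end_ process → Pre_solution end_ process → Spec_solution end_ process (solution end_ process)
def Claim_changed_solution : Prop := Dom_solution (pvDiffWitness_solution.1) (pvDiffWitness_solution.2) ∧ Pre_solution (pvDiffWitness_solution.1) (pvDiffWitness_solution.2) ∧ D_solution (pvDiffWitness_solution.1) (pvDiffWitness_solution.2) ∧ solution (pvDiffWitness_solution.1) (pvDiffWitness_solution.2) = pvDiffWitnessOut_solution.1 ∧ solution_alt (pvDiffWitness_solution.1) (pvDiffWitness_solution.2) = pvDiffWitnessOut_solution.2 ∧ pvDiffWitnessOut_solution.1 ≠ pvDiffWitnessOut_solution.2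
def Claim_exact_solution : Prop := ∀ (end_ : Int) (process : List Int), Dom_solution end_ process → Pre_solution end_ process → D_solution end_ process → solution end_ process ≠ solution_alt end_ process

-- ===== LEMMAS AND PROOFS =====

-- ---- proof-side notions ----

-- a "harmful" leaf: negative and ≤ end_
def harmB (end_ v : Int) : Bool := decide (v < 0 ∧ v ≤ end_)
def Badn (end_ : Int) (process : List Int) : Nat := process.findIdx (harmB end_)
def Covb (end_ : Int) (process : List Int) : Bool :=
  (PySem.List.pyRange 1 (end_ + 1) 1).all (fun p => process.contains p)
def Mn (end_ : Int) (process : List Int) : Nat :=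
  (PySem.List.pyRange 1 (end_ + 1) 1).foldl (fun m p => max m (process.idxOf p)) 0

-- the set A has built after consuming prefix `pre`
def chk (end_ : Int) (pre : List Int) : PySem.Set Int :=
  PySem.Set.ofList (pre.filter (fun v => decide (v ≤ end_)))

def tgt (end_ : Int) : Int := (PySem.List.pyRange 0 (end_ + 1) 1).sum

-- A's target is 0 after consuming `pre` iff `pre` covers 1..end_ and has no poisoning leaf
def okb (end_ : Int) (pre : List Int) : Bool :=
  (PySem.List.pyRange 1 (end_ + 1) 1).all (fun p => pre.contains p) &&
    pre.all (fun v => !harmB end_ v)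

def firstOk (end_ : Int) (process : List Int) (k : Nat) : Int :=
  if h : k < process.length then
    (if okb end_ (process.take (k + 1)) then (k : Int) else firstOk end_ process (k + 1))
  else -1
  termination_by process.length - k

lemma tgt_eq (end_ : Int) : tgt end_ = ∑ x ∈ Finset.Icc 1 end_, x := by
  have hnd := PySem.List.nodup_pyRange_one (a := 0) (b := end_ + 1)
  have hts : (PySem.List.pyRange 0 (end_ + 1) 1).toFinset = Finset.Icc 0 end_ := by
    ext x
    simp [List.mem_toFinset, PySem.List.mem_pyRange_one]
  have h1 : tgt end_ = ∑ x ∈ Finset.Icc 0 end_, x := by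
    have := List.sum_toFinset (fun x : Int => x) hnd
    simp only [List.map_id'] at this
    rw [tgt, ← this, hts]
  rw [h1]
  rw [← Finset.sum_subset (Finset.Icc_subset_Icc (by norm_num : (0:Int) ≤ 1) le_rfl)]
  intro x hx hn
  simp [Finset.mem_Icc] at hx hn
  omega

lemma finset_sum_eq_iff (end_ : Int) (F : Finset Int) (hle : ∀ v ∈ F, v ≤ end_) :
    (∑ v ∈ F, v) = (∑ x ∈ Finset.Icc 1 end_, x) ↔
      ((Finset.Icc 1 end_ ⊆ F) ∧ ∀ v ∈ F, 0 ≤ v) := by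
  set P := Finset.Icc (1:Int) end_ with hP
  have hsplit : ∑ v ∈ F ∩ P, (v:Int) + ∑ v ∈ F \ P, v = ∑ v ∈ F, v :=
    Finset.sum_inter_add_sum_diff F P _
  have hFn_nonpos : ∀ v ∈ F \ P, v ≤ 0 := by
    intro v hv
    rcases Finset.mem_sdiff.mp hv with ⟨hvF, hvP⟩
    have := hle v hvF
    simp [hP, Finset.mem_Icc] at hvP
    omega
  constructor
  · intro hsum
    by_contra hcon
    rw [Decidable.not_and_iff_or_not] at hcon
    have hlt : ∑ v ∈ F, v < ∑ x ∈ P, x := by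
      rcases hcon with hns | hneg
      · rcases Finset.not_subset.mp hns with ⟨p, hpP, hpF⟩
        have hp1 : 1 ≤ p := by simp [hP, Finset.mem_Icc] at hpP; omega
        have h2 : ∑ v ∈ F ∩ P, v ≤ ∑ x ∈ P.erase p, x := by
          apply Finset.sum_le_sum_of_subset_of_nonneg
          · intro x hx
            rcases Finset.mem_inter.mp hx with ⟨hxF, hxP⟩
            exact Finset.mem_erase.mpr ⟨fun h => hpF (h ▸ hxF), hxP⟩
          · intro i hi _
            simp [hP, Finset.mem_Icc] at hi
            omega
        have h3 : ∑ x ∈ P.erase p, x + p = ∑ x ∈ P, x := Finset.sum_erase_add P _ hpP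
        have h4 : ∑ v ∈ F \ P, v ≤ 0 := Finset.sum_nonpos hFn_nonpos
        omega
      · push Not at hneg
        rcases hneg with ⟨v0, hv0F, hv0⟩
        have hv0n : v0 ∈ F \ P := by
          refine Finset.mem_sdiff.mpr ⟨hv0F, ?_⟩
          simp [hP, Finset.mem_Icc]; omega
        have h2 : ∑ v ∈ F ∩ P, v ≤ ∑ x ∈ P, x := by
          apply Finset.sum_le_sum_of_subset_of_nonneg Finset.inter_subset_right
          intro i hi _
          simp [hP, Finset.mem_Icc] at hi
          omega
        have h3 : ∑ v ∈ (F \ P).erase v0, v + v0 = ∑ v ∈ F \ P, v :=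
          Finset.sum_erase_add _ _ hv0n
        have h4 : ∑ v ∈ (F \ P).erase v0, v ≤ 0 :=
          Finset.sum_nonpos (fun v hv => hFn_nonpos v (Finset.mem_of_mem_erase hv))
        omega
    omega
  · rintro ⟨hsub, hnn⟩
    symm
    apply Finset.sum_subset hsub
    intro x hxF hxP
    have := hFn_nonpos x (Finset.mem_sdiff.mpr ⟨hxF, hxP⟩)
    have := hnn x hxF
    omega

lemma mem_chk (end_ : Int) (pre : List Int) (v : Int) :
    v ∈ chk end_ pre ↔ v ∈ pre ∧ v ≤ end_ := by
  simp [chk, PySem.Set.mem_ofList]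

lemma sum_chk_eq_iff (end_ : Int) (pre : List Int) :
    (chk end_ pre).sum = tgt end_ ↔ okb end_ pre = true := by
  have hnd : (chk end_ pre : List Int).Nodup := PySem.Set.nodup_ofList _
  have hsum : (chk end_ pre : List Int).sum = ∑ v ∈ (chk end_ pre : List Int).toFinset, v := by
    have h := List.sum_toFinset (fun x : Int => x) hnd
    simp only [List.map_id'] at h
    rw [h]
  have hle : ∀ v ∈ (chk end_ pre : List Int).toFinset, v ≤ end_ := by
    intro v hv
    rw [List.mem_toFinset, mem_chk] at hv
    exact hv.2
  rw [hsum, tgt_eq, finset_sum_eq_iff end_ _ hle]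
  simp only [okb, Bool.and_eq_true, List.all_eq_true, Finset.subset_iff, Finset.mem_Icc,
    List.mem_toFinset, mem_chk, PySem.List.mem_pyRange_one, harmB, Bool.not_eq_eq_eq_not,
    Bool.not_true, decide_eq_false_iff_not, List.contains_iff_mem]
  constructor
  · rintro ⟨h1, h2⟩
    refine ⟨fun x hx => (h1 ⟨hx.1, by omega⟩).1, fun v hv => ?_⟩
    intro hcon
    have := h2 v ⟨hv, hcon.2⟩
    omega
  · rintro ⟨h1, h2⟩
    refine ⟨fun x hx => ⟨h1 x ⟨hx.1, by omega⟩, hx.2⟩, fun v hv => ?_⟩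
    by_contra hneg
    exact h2 v hv.1 ⟨by omega, hv.2⟩

lemma chk_append (end_ : Int) (pre : List Int) (r : Int) :
    chk end_ (pre ++ [r]) =
      if r ≤ end_ then PySem.Set.add (chk end_ pre) r else chk end_ pre := by
  by_cases h : r ≤ end_ <;> simp [chk, List.filter_append, h, PySem.Set.ofList_append_singleton]

lemma sum_add (s : PySem.Set Int) (r : Int) :
    (PySem.Set.add s r : List Int).sum = if r ∈ s then s.sum else s.sum + r := by
  by_cases h : r ∈ s
  · simp [h]
  · simp [h]

lemma sum_Icc_two_mul (n : Int) (h : 0 ≤ n) :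
    2 * (∑ x ∈ Finset.Icc (1 : Int) n, x) = n * (n + 1) := by
  induction n, h using Int.le_induction with
  | base => simp
  | succ n hn ih =>
    have hins : Finset.Icc (1 : Int) (n + 1) = insert (n + 1) (Finset.Icc 1 n) := by
      ext x
      simp only [Finset.mem_Icc, Finset.mem_insert]
      omega
    have hnot : (n + 1) ∉ Finset.Icc (1 : Int) n := by
      simp only [Finset.mem_Icc]
      omega
    rw [hins, Finset.sum_insert hnot, mul_add, ih]
    ring

lemma pySum0_eq (end_ : Int) : pySum0 (end_ + 1) = tgt end_ := by
  rw [tgt_eq, pySum0]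
  by_cases h : 0 ≤ end_
  · rw [if_pos (by omega : (0 : Int) < end_ + 1)]
    have hg := sum_Icc_two_mul end_ h
    have hring : (end_ + 1) * (end_ + 1 - 1) = end_ * (end_ + 1) := by ring
    rw [hring]
    set t : Int := end_ * (end_ + 1) with ht
    omega
  · rw [if_neg (by omega), Finset.Icc_eq_empty (by omega : ¬ (1 : Int) ≤ end_)]
    simp

lemma loopA (end_ : Int) (process : List Int) :
    ∀ (rest pre : List Int), process = pre ++ rest → rest ≠ [] →
    solutionLoop end_ ((process.length : Int) - 1) (chk end_ pre)
        (tgt end_ - (chk end_ pre).sum) (PySem.List.enumerate rest (pre.length : Int))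
      = firstOk end_ process pre.length := by
  intro rest
  induction rest with
  | nil => intro pre _ hne; exact absurd rfl hne
  | cons r rest' ih =>
    intro pre hsplit _
    have htake : process.take (pre.length + 1) = pre ++ [r] := by
      subst hsplit
      rw [show pre.length + 1 = pre.length + 1 from rfl]
      rw [List.take_append]
      simp
    have hst : (if !(PySem.Set.contains (chk end_ pre) r) then
          (if r ≤ end_ then (PySem.Set.add (chk end_ pre) r, (tgt end_ - (chk end_ pre).sum) - r)
           else (chk end_ pre, tgt end_ - (chk end_ pre).sum))
        else (chk end_ pre, tgt end_ - (chk end_ pre).sum))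
        = (chk end_ (pre ++ [r]), tgt end_ - (chk end_ (pre ++ [r])).sum) := by
      by_cases hc : r ∈ chk end_ pre
      · have hcb : PySem.Set.contains (chk end_ pre) r = true := by
          simpa [PySem.Set.contains_iff] using hc
        have hr : r ≤ end_ := (mem_chk end_ pre r).mp hc |>.2
        rw [chk_append]
        simp [hr, PySem.Set.add_of_mem hc]
        exact fun h => absurd hc h
      · have hcb : PySem.Set.contains (chk end_ pre) r = false := by
          simp [hc]
        rw [chk_append]
        by_cases hr : r ≤ end_
        · simp only [hcb, Bool.not_false, hr, if_pos]
          rw [sum_add]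
          simp [hc]
          ring
        · simp [hr]
    rw [PySem.List.enumerate_cons]
    rw [solutionLoop]
    simp only [hst]
    have hlen : pre.length < process.length := by subst hsplit; simp
    rw [firstOk, dif_pos hlen, htake]
    by_cases hok : okb end_ (pre ++ [r]) = true
    · have : tgt end_ - (chk end_ (pre ++ [r])).sum = 0 := by
        have := (sum_chk_eq_iff end_ (pre ++ [r])).mpr hok
        omega
      simp [this, hok]
    · have hne0 : ¬ (tgt end_ - (chk end_ (pre ++ [r])).sum = 0) := by
        intro h0
        exact hok ((sum_chk_eq_iff end_ (pre ++ [r])).mp (by omega))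
      simp only [hne0, if_false, hok]
      by_cases hlast : rest' = []
      · subst hlast
        have : (pre.length : Int) = (process.length : Int) - 1 := by
          subst hsplit; simp
        rw [if_pos this]
        rw [firstOk]
        have : ¬ (pre.length + 1 < process.length) := by subst hsplit; simp
        rw [dif_neg this]
        simp
      · have hidx : ¬ ((pre.length : Int) = (process.length : Int) - 1) := by
          subst hsplit
          simp only [List.length_append, List.length_cons]
          intro h
          have : rest'.length = 0 := by push_cast at h; omega
          exact hlast (List.eq_nil_of_length_eq_zero this)
        rw [if_neg hidx]
        have hcast : (pre.length : Int) + 1 = ((pre ++ [r]).length : Int) := by simp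
        rw [hcast]
        have := ih (pre ++ [r]) (by simpa using hsplit) hlast
        simpa using this

lemma solution_eq_firstOk (end_ : Int) (process : List Int) (h : process ≠ []) :
    solution end_ process = firstOk end_ process 0 := by
  have h0 := loopA end_ process process [] (by simp) h
  rw [solution, pySum0_eq]
  simpa [tgt, chk] using h0

lemma mem_take_iff_idxOf (xs : List Int) (v : Int) : ∀ (m : Nat),
    v ∈ xs.take m ↔ v ∈ xs ∧ xs.idxOf v < m := by
  induction xs with
  | nil => intro m; simp
  | cons x xs ih =>
    intro m
    cases m with
    | zero => simp
    | succ m =>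
      by_cases hv : v = x
      · subst hv; simp [List.idxOf_cons_self]
      · simp only [List.take_succ_cons, List.mem_cons, ih m,
          List.idxOf_cons_ne _ (by exact fun h => hv h.symm)]
        constructor
        · rintro (h | ⟨h1, h2⟩)
          · exact absurd h hv
          · exact ⟨Or.inr h1, by omega⟩
        · rintro ⟨h1 | h1, h2⟩
          · exact absurd h1 hv
          · exact Or.inr ⟨h1, by omega⟩

lemma no_harm_take_iff (end_ : Int) (xs : List Int) (m : Nat) (hm : m ≤ xs.length) :
    ((xs.take m).all (fun v => !harmB end_ v) = true) ↔ m ≤ Badn end_ xs := by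
  constructor
  · intro hall
    by_contra hlt
    have hfl : Badn end_ xs < xs.length := by omega
    have hharm : harmB end_ (xs[Badn end_ xs]'hfl) = true := List.findIdx_getElem
    have hlt2 : Badn end_ xs < (xs.take m).length := by
      rw [List.length_take]; omega
    have hmem : xs[Badn end_ xs]'hfl ∈ xs.take m := by
      have hg : (xs.take m)[Badn end_ xs]'hlt2 = xs[Badn end_ xs]'hfl := by
        simp [List.getElem_take]
      rw [← hg]
      exact List.getElem_mem hlt2
    have := List.all_eq_true.mp hall _ hmem
    simp [hharm] at this
  · intro hle
    rw [List.all_eq_true]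
    intro v hv
    rw [mem_take_iff_idxOf] at hv
    have hidx : xs.idxOf v < xs.length := by omega
    have hgl : xs[xs.idxOf v]'hidx = v := List.getElem_idxOf hidx
    have hlt3 : xs.idxOf v < xs.findIdx (harmB end_) := by
      have hB : Badn end_ xs = xs.findIdx (harmB end_) := rfl
      omega
    have := List.not_of_lt_findIdx hlt3
    simp [show harmB end_ v = false from hgl ▸ this]

lemma foldl_max_le_iff {α : Type} (l : List α) (f : α → Nat) : ∀ (init k : Nat),
    l.foldl (fun m p => max m (f p)) init ≤ k ↔ init ≤ k ∧ ∀ p ∈ l, f p ≤ k := by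
  induction l with
  | nil => intro init k; simp
  | cons x l ih =>
    intro init k
    rw [List.foldl_cons, ih]
    simp only [List.mem_cons]
    constructor
    · rintro ⟨h1, h2⟩
      exact ⟨by omega, fun p hp => by rcases hp with rfl | hp; omega; exact h2 p hp⟩
    · rintro ⟨h1, h2⟩
      exact ⟨by have := h2 x (Or.inl rfl); omega, fun p hp => h2 p (Or.inr hp)⟩

lemma okb_take_iff (end_ : Int) (process : List Int) (k : Nat) (hk : k < process.length) :
    (okb end_ (process.take (k + 1)) = true ↔
      (Covb end_ process = true ∧ Mn end_ process ≤ k ∧ k < Badn end_ process)) := by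
  rw [okb, Bool.and_eq_true, no_harm_take_iff end_ process (k+1) (by omega)]
  have hMn : (Mn end_ process ≤ k) ↔
      ∀ p ∈ PySem.List.pyRange 1 (end_ + 1) 1, process.idxOf p ≤ k := by
    rw [Mn, foldl_max_le_iff]
    simp
  constructor
  · rintro ⟨h1, h2⟩
    rw [List.all_eq_true] at h1
    refine ⟨?_, ?_, by omega⟩
    · rw [Covb, List.all_eq_true]
      intro p hp
      have := h1 p hp
      rw [List.contains_iff_mem, mem_take_iff_idxOf] at this
      rw [List.contains_iff_mem]
      exact this.1
    · rw [hMn]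
      intro p hp
      have := h1 p hp
      rw [List.contains_iff_mem, mem_take_iff_idxOf] at this
      omega
  · rintro ⟨h1, h2, h3⟩
    refine ⟨?_, by omega⟩
    rw [List.all_eq_true]
    intro p hp
    rw [Covb, List.all_eq_true] at h1
    have hmem := h1 p hp
    rw [List.contains_iff_mem] at hmem
    rw [hMn] at h2
    rw [List.contains_iff_mem, mem_take_iff_idxOf]
    exact ⟨hmem, by have := h2 p hp; omega⟩

lemma firstOk_eq (end_ : Int) (process : List Int) : ∀ (d k : Nat), process.length ≤ k + d →
    firstOk end_ process k =
      (if Covb end_ process = true ∧ max k (Mn end_ process) < Badn end_ process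
       then ((max k (Mn end_ process) : Nat) : Int) else -1) := by
  have hBl : Badn end_ process ≤ process.length := List.findIdx_le_length
  intro d
  induction d with
  | zero =>
    intro k hk
    rw [firstOk, dif_neg (by omega)]
    rw [if_neg (by rintro ⟨h1, h2⟩; omega)]
  | succ d ihd =>
    intro k hk
    rw [firstOk]
    by_cases hklen : k < process.length
    · rw [dif_pos hklen]
      by_cases hok : okb end_ (process.take (k + 1)) = true
      · rw [if_pos hok]
        rcases (okb_take_iff end_ process k hklen).mp hok with ⟨h1, h2, h3⟩
        rw [if_pos ⟨h1, by omega⟩]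
        congr 1
        omega
      · rw [if_neg hok, ihd (k + 1) (by omega)]
        have hnot := fun h => hok ((okb_take_iff end_ process k hklen).mpr h)
        by_cases hcov : Covb end_ process = true
        · by_cases hMk : Mn end_ process ≤ k
          · have hbk : Badn end_ process ≤ k := by
              by_contra hc
              exact hnot ⟨hcov, hMk, by omega⟩
            rw [if_neg (by rintro ⟨_, h⟩; omega), if_neg (by rintro ⟨_, h⟩; omega)]
          · have : max (k + 1) (Mn end_ process) = max k (Mn end_ process) := by omega
            rw [this]
        · rw [if_neg (by rintro ⟨h, _⟩; exact hcov h), if_neg (by rintro ⟨h, _⟩; exact hcov h)]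
    · rw [dif_neg hklen]
      rw [if_neg (by rintro ⟨h1, h2⟩; omega)]

lemma idxOf?_of_mem (xs : List Int) (v : Int) (h : v ∈ xs) :
    xs.idxOf? v = some (xs.idxOf v) := by
  rw [List.idxOf?_eq_some_iff]
  refine ⟨List.idxOf_lt_length_of_mem h, List.getElem_idxOf _, fun j hj => ?_⟩
  intro he
  have hjl : j < xs.length := by
    have := List.idxOf_lt_length_of_mem h; omega
  have hmem : v ∈ xs.take (j + 1) := by
    have hlt2 : j < (xs.take (j+1)).length := by rw [List.length_take]; omega
    have hg : (xs.take (j+1))[j]'hlt2 = xs[j]'hjl := by simp [List.getElem_take]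
    rw [← he, ← hg]
    exact List.getElem_mem hlt2
  rw [mem_take_iff_idxOf] at hmem
  omega

lemma dictFold_get? (xs : List Int) : ∀ (s : Int) (d : PySem.Dict Int Int) (v : Int),
    ((PySem.List.enumerate xs s).foldl
        (fun d p => if d.contains p.2 then d else d.insert p.2 p.1) d).get? v =
      (if d.contains v then d.get? v
       else (PySem.List.index? xs v).map (fun k => s + (k : Int))) := by
  induction xs with
  | nil =>
    intro s d v
    by_cases h : d.contains v = true
    · simp [PySem.List.enumerate_nil, h]
    · simp only [PySem.List.enumerate_nil, List.foldl_nil, h]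
      have hn : (d.get? v) = none := by
        have hi : (d.get? v).isSome = false := by
          rw [← PySem.Dict.contains_eq_isSome_get?]; simpa using h
        simpa [Option.isSome_eq_false_iff] using hi
      simp [hn, PySem.List.index?_eq_idxOf?]
  | cons x xs ih =>
    intro s d v
    rw [PySem.List.enumerate_cons, List.foldl_cons]
    by_cases hdx : d.contains x = true
    · rw [if_pos hdx, ih]
      by_cases hxv : x = v
      · subst hxv
        rw [if_pos hdx, if_pos hdx]
      · by_cases hdv : d.contains v = true
        · simp [hdv]
        · simp only [hdv, if_neg, Bool.false_eq_true, not_false_iff]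
          rw [PySem.List.index?_eq_idxOf?, PySem.List.index?_eq_idxOf?]
          rw [List.idxOf?_cons]
          simp only [show (x == v) = false by simpa using hxv]
          cases h : xs.idxOf? v <;> simp
          omega
    · rw [if_neg (by simpa using hdx), ih]
      by_cases hxv : x = v
      · subst hxv
        rw [if_pos (by simp [PySem.Dict.contains_insert_self])]
        rw [if_neg (by simpa using hdx)]
        rw [PySem.Dict.get?_insert_self]
        rw [PySem.List.index?_eq_idxOf?, List.idxOf?_cons]
        simp
      · have hci : (d.insert x s).contains v = d.contains v := by
          rw [PySem.Dict.contains_insert]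
          simp [show (v == x) = false by simpa using (fun h => hxv h.symm)]
        rw [hci]
        by_cases hdv : d.contains v = true
        · rw [if_pos hdv, if_pos hdv]
          exact PySem.Dict.get?_insert_of_ne _ _ (fun h => hxv h.symm)
        · simp only [hdv, Bool.false_eq_true, if_neg, not_false_iff]
          rw [PySem.List.index?_eq_idxOf?, PySem.List.index?_eq_idxOf?, List.idxOf?_cons]
          simp only [show (x == v) = false by simpa using hxv]
          cases h : xs.idxOf? v <;> simp
          omega

lemma crossLoop_eq (first : PySem.Dict Int Int) (process : List Int) (end_ : Int)
    (hc : ∀ v, first.contains v = process.contains v)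
    (hg : ∀ v, process.contains v = true → first.getD v 0 = ((process.idxOf v : Nat) : Int)) :
    ∀ (n : Nat) (p m : Int), (end_ + 1 - p).toNat = n →
    crossLoop first n p m =
      (if (PySem.List.pyRange p (end_ + 1) 1).all (fun q => process.contains q)
       then (PySem.List.pyRange p (end_ + 1) 1).foldl
              (fun m q => max m ((process.idxOf q : Nat) : Int)) m
       else -1) := by
  intro n
  induction n with
  | zero =>
    intro p m hn
    rw [crossLoop]
    have hempty : PySem.List.pyRange p (end_ + 1) 1 = [] := by
      rw [PySem.List.pyRange_one, hn]
      simp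
    rw [hempty]
    simp
  | succ n ih =>
    intro p m hn
    have hcons : PySem.List.pyRange p (end_ + 1) 1 = p :: PySem.List.pyRange (p + 1) (end_ + 1) 1 :=
      PySem.List.pyRange_one_cons (by omega)
    rw [crossLoop, hcons, hc p]
    by_cases hp : process.contains p = true
    · have hpm : p ∈ process := by simpa using hp
      rw [if_neg (by simp [hpm]), ih (p + 1) _ (by omega), hg p hp]
      simp only [List.all_cons, hp, Bool.true_and, List.foldl_cons]
    · have hpm : p ∉ process := by simpa using hp
      rw [if_pos (by simp [hpm])]
      simp [hpm]

lemma foldl_max_cast (l : List Int) (f : Int → Nat) : ∀ (init : Nat),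
    l.foldl (fun m p => max m ((f p : Nat) : Int)) ((init : Nat) : Int) =
      ((l.foldl (fun m p => max m (f p)) init : Nat) : Int) := by
  induction l with
  | nil => intro init; simp
  | cons x l ih =>
    intro init
    rw [List.foldl_cons, List.foldl_cons, ← Nat.cast_max, ih]

lemma wins_iff (end_ : Int) (l : List Int) :
    wins end_ l ↔
      (l ≠ [] ∧ (PySem.List.pyRange 1 (end_ + 1) 1).all (fun p => l.contains p) = true) := by
  rw [wins, and_congr_right_iff]
  intro _
  by_cases he : end_ ≤ 0
  · have hcov : (PySem.List.pyRange 1 (end_ + 1) 1).all (fun p => l.contains p) = true := by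
      rw [List.all_eq_true]
      intro p hp
      rw [PySem.List.mem_pyRange_one] at hp
      omega
    have htn : end_.toNat = 0 := by omega
    exact ⟨fun _ => hcov, fun _ => htn ▸ Nat.zero_le _⟩
  · have hpos : 1 ≤ end_ := by omega
    have hcnt : (l.dedup.countP fun v => 1 ≤ v && v ≤ end_)
        = (l.filter fun v => 1 ≤ v && v ≤ end_).toFinset.card := by
      rw [List.countP_eq_length_filter]
      have hnd : (l.dedup.filter fun v => 1 ≤ v && v ≤ end_).Nodup :=
        l.nodup_dedup.filter _
      rw [← List.toFinset_card_of_nodup hnd]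
      congr 1
      ext x
      simp
    have hsub : (l.filter fun v => 1 ≤ v && v ≤ end_).toFinset ⊆ Finset.Icc 1 end_ := by
      intro p hp
      rw [List.mem_toFinset, List.mem_filter] at hp
      have hpv := hp.2
      simp only [Bool.and_eq_true, decide_eq_true_eq] at hpv
      rw [Finset.mem_Icc]
      omega
    have hIccCard : (Finset.Icc (1 : Int) end_).card = end_.toNat := by
      rw [Int.card_Icc]
      omega
    have hcovsub : (PySem.List.pyRange 1 (end_ + 1) 1).all (fun p => l.contains p) = true ↔
        Finset.Icc (1 : Int) end_ ⊆ (l.filter fun v => 1 ≤ v && v ≤ end_).toFinset := by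
      rw [List.all_eq_true]
      constructor
      · intro h p hp
        rw [Finset.mem_Icc] at hp
        have := h p (by rw [PySem.List.mem_pyRange_one]; omega)
        rw [List.contains_iff_mem] at this
        rw [List.mem_toFinset, List.mem_filter]
        refine ⟨this, ?_⟩
        simp only [Bool.and_eq_true, decide_eq_true_eq]
        omega
      · intro h p hp
        rw [PySem.List.mem_pyRange_one] at hp
        have := h (Finset.mem_Icc.mpr (by omega : 1 ≤ p ∧ p ≤ end_))
        rw [List.mem_toFinset, List.mem_filter] at this
        rw [List.contains_iff_mem]
        exact this.1
    rw [hcovsub, hcnt]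
    constructor
    · intro h
      have hle : (Finset.Icc (1 : Int) end_).card
          ≤ (l.filter fun v => 1 ≤ v && v ≤ end_).toFinset.card := by
        rw [hIccCard]; omega
      rw [Finset.eq_of_subset_of_card_le hsub hle]
    · intro h
      have heq : (l.filter fun v => 1 ≤ v && v ≤ end_).toFinset = Finset.Icc 1 end_ :=
        Finset.Subset.antisymm hsub h
      rw [heq, hIccCard]

lemma takeWhile_eq_take {α : Type} (q : α → Bool) (l : List α) :
    l.takeWhile q = l.take (l.findIdx (fun v => !q v)) := by
  induction l with
  | nil => rfl
  | cons x l ih =>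
    by_cases h : q x = true
    · rw [List.takeWhile_cons, List.findIdx_cons]
      simp only [h, Bool.not_true, cond_false, if_true, List.take_succ_cons]
      rw [ih]
    · rw [List.takeWhile_cons, List.findIdx_cons]
      have hb : q x = false := by simpa using h
      simp [hb]

lemma foldl_max_attained {α : Type} (l : List α) (f : α → Nat) : ∀ (init : Nat),
    l.foldl (fun m x => max m (f x)) init = init ∨
      ∃ x ∈ l, l.foldl (fun m x => max m (f x)) init = f x := by
  induction l with
  | nil => intro init; left; rfl
  | cons y l ih =>
    intro init
    rw [List.foldl_cons]
    rcases ih (max init (f y)) with h | ⟨x, hx, hfx⟩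
    · rw [h]
      rcases max_choice init (f y) with h2 | h2
      · left; exact h2
      · right; exact ⟨y, List.mem_cons_self, h2⟩
    · right; exact ⟨x, List.mem_cons_of_mem _ hx, hfx⟩

lemma D_iff (end_ : Int) (process : List Int) (hne : process ≠ []) :
    D_solution end_ process ↔ (Covb end_ process = true ∧ Badn end_ process ≤ Mn end_ process) := by
  have hq : (fun v : Int => !(decide (0 ≤ v) || decide (end_ < v))) = harmB end_ := by
    funext v
    by_cases h1 : (0 : Int) ≤ v
    · simp only [h1, decide_true, Bool.true_or, Bool.not_true]
      symm
      rw [harmB, decide_eq_false_iff_not]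
      omega
    · by_cases h2 : end_ < v
      · simp only [h2, decide_true, Bool.or_true, Bool.not_true]
        symm
        rw [harmB, decide_eq_false_iff_not]
        omega
      · simp only [h1, h2, decide_false, Bool.or_false, Bool.not_false]
        symm
        rw [harmB, decide_eq_true_eq]
        omega
  have hpre : process.takeWhile (fun v => decide (0 ≤ v) || decide (end_ < v))
      = process.take (Badn end_ process) := by
    rw [takeWhile_eq_take, hq, Badn]
  have hMle := (foldl_max_le_iff (PySem.List.pyRange 1 (end_ + 1) 1)
      (fun p => process.idxOf p) 0 (Mn end_ process)).mp (le_refl _)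
  rw [D_solution]
  simp only [hpre]
  rw [wins_iff, wins_iff]
  rw [show ((PySem.List.pyRange 1 (end_ + 1) 1).all (fun p => process.contains p))
      = Covb end_ process from rfl]
  constructor
  · rintro ⟨⟨_, hc⟩, hnw⟩
    refine ⟨hc, ?_⟩
    by_cases hts : process.take (Badn end_ process) = []
    · rw [List.take_eq_nil_iff] at hts
      have hb0 : Badn end_ process = 0 := by
        rcases hts with h | h
        · exact h
        · exact absurd h hne
      rw [hb0]
      exact Nat.zero_le _
    · have hncov : ¬ ((PySem.List.pyRange 1 (end_ + 1) 1).all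
          (fun p => (process.take (Badn end_ process)).contains p) = true) := by
        intro hcon
        exact hnw ⟨hts, hcon⟩
      rw [List.all_eq_true] at hncov
      push Not at hncov
      obtain ⟨p, hp, hnc⟩ := hncov
      have hpmem : p ∈ process := by
        rw [Covb, List.all_eq_true] at hc
        have := hc p hp
        rwa [List.contains_iff_mem] at this
      have hnt : p ∉ process.take (Badn end_ process) := by
        intro hcon
        rw [← List.contains_iff_mem] at hcon
        exact hnc hcon
      have hge : Badn end_ process ≤ process.idxOf p := by
        by_contra hlt
        exact hnt ((mem_take_iff_idxOf process p _).mpr ⟨hpmem, by omega⟩)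
      have := hMle.2 p hp
      omega
  · rintro ⟨hc, hle⟩
    refine ⟨⟨hne, hc⟩, ?_⟩
    rintro ⟨hts, hcall⟩
    rcases foldl_max_attained (PySem.List.pyRange 1 (end_ + 1) 1)
        (fun p => process.idxOf p) 0 with h0 | ⟨p, hp, hfp⟩
    · have hb0 : Badn end_ process = 0 := by
        have : Mn end_ process = 0 := h0
        omega
      rw [hb0, List.take_zero] at hts
      exact hts rfl
    · have hMp : Mn end_ process = process.idxOf p := hfp
      rw [List.all_eq_true] at hcall
      have := hcall p hp
      rw [List.contains_iff_mem, mem_take_iff_idxOf] at this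
      omega

lemma alt_eq (end_ : Int) (process : List Int) :
    solution_alt end_ process =
      (if Covb end_ process = true then ((Mn end_ process : Nat) : Int) else -1) := by
  rw [solution_alt]
  have hget : ∀ v, ((PySem.List.enumerate process 0).foldl
      (fun d p => if d.contains p.2 then d else d.insert p.2 p.1) PySem.Dict.empty).get? v =
      (process.idxOf? v).map (fun k => (k : Int)) := by
    intro v
    rw [dictFold_get? process 0 PySem.Dict.empty v]
    rw [if_neg (by simp [PySem.Dict.contains_empty])]
    rw [PySem.List.index?_eq_idxOf?]
    cases h : process.idxOf? v <;> simp
  have hc : ∀ v, ((PySem.List.enumerate process 0).foldl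
      (fun d p => if d.contains p.2 then d else d.insert p.2 p.1) PySem.Dict.empty).contains v
      = process.contains v := by
    intro v
    rw [PySem.Dict.contains_eq_isSome_get?, hget v]
    by_cases h : v ∈ process
    · rw [idxOf?_of_mem process v h]
      simp [h]
    · rw [List.idxOf?_eq_none_iff.mpr h]
      simp [h]
  have hg : ∀ v, process.contains v = true → ((PySem.List.enumerate process 0).foldl
      (fun d p => if d.contains p.2 then d else d.insert p.2 p.1) PySem.Dict.empty).getD v 0
      = ((process.idxOf v : Nat) : Int) := by
    intro v hv
    rw [PySem.Dict.getD_eq_get?_getD, hget v, idxOf?_of_mem process v (by simpa using hv)]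
    simp
  rw [crossLoop_eq _ process end_ hc hg end_.toNat 1 0 (by omega)]
  have hfc : (0 : Int) = ((0 : Nat) : Int) := rfl
  rw [hfc, foldl_max_cast (PySem.List.pyRange 1 (end_ + 1) 1) (fun p => process.idxOf p) 0]
  rw [show (PySem.List.pyRange 1 (end_ + 1) 1).foldl (fun m p => max m (process.idxOf p)) 0
      = Mn end_ process from rfl]
  by_cases hcov : Covb end_ process = true
  · rw [Covb] at hcov
    rw [if_pos hcov, if_pos (by rwa [Covb])]
  · rw [Covb] at hcov
    rw [if_neg hcov, if_neg (by rwa [Covb])]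

-- ===== VERDICT (by name: the statement is the Claim_ definition above) =====
theorem solution_spec : Claim_unchanged_solution := by
  intro end_ process _ hpre
  unfold Spec_solution
  intro hnd
  rw [solution_eq_firstOk end_ process hpre,
      firstOk_eq end_ process process.length 0 (by omega), alt_eq]
  rw [D_iff end_ process hpre] at hnd
  by_cases hcov : Covb end_ process = true
  · have hlt : Mn end_ process < Badn end_ process := by
      by_contra h
      exact hnd ⟨hcov, by omega⟩
    rw [if_pos ⟨hcov, by omega⟩, if_pos hcov]
    simp
  · rw [if_neg (by rintro ⟨h, _⟩; exact hcov h), if_neg hcov]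

theorem solution_changed : Claim_changed_solution := by
  unfold Claim_changed_solution; decide

theorem solution_tight : Claim_exact_solution := by
  intro end_ process _ hpre hd
  rcases (D_iff end_ process hpre).mp hd with ⟨hcov, hle⟩
  rw [solution_eq_firstOk end_ process hpre,
      firstOk_eq end_ process process.length 0 (by omega), alt_eq]
  rw [if_neg (by rintro ⟨_, h⟩; simp at h; omega), if_pos hcov]
  intro h
  omega
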